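-- pv_equiv track=rewrite | github.com/jshcrm/charter-questions | question-3.py | max_sum_of_contiguous_integers
-- ===== SOURCE A (Python) =====
-- def integers_are_contiguous(value: int, compare: int) -> bool:
--     return compare in [value + 1, value - 1]
--
-- def max_sum_of_contiguous_integers(integers: list[int]) -> int:
--     sums_of_contiguous_groups = []
--     current_group = []
--
--     for index, x in enumerate(integers):
--         if current_group == []:
--             current_group.append(x)
--             continue
--
--         # Check if value is contiguous with the last value in current group
--         if integers_are_contiguous(current_group[-1], x):
--             current_group.append(x)
--
--             # If this is the last item in our list and the group has more than 1 value add it to sums list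
--             if index == (len(integers) - 1) and len(current_group) > 1:
--                 sums_of_contiguous_groups.append(sum(current_group))
--
--             continue
--
--         # Values not contiguous - if our current group has more than 1 value in it, sum it and add to sums list
--         if len(current_group) > 1:
--             sums_of_contiguous_groups.append(sum(current_group))
--
--         # Start a new group with the new value
--         current_group = [x]
--
--     return max(sums_of_contiguous_groups)
-- ===== SOURCE B (Python) =====
-- def max_sum_of_contiguous_integers(integers):
--     # Pass 1: label each element with a group id; bump the id at each non-contiguous step.
--     ids = []
--     gid = 0
--     prev = None
--     for x in integers:
--         if prev is not None and abs(x - prev) != 1: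
--             gid += 1
--         ids.append(gid)
--         prev = x
--     # Pass 2: accumulate (sum, count) per group id.
--     table = {}
--     for g, x in zip(ids, integers):
--         s, c = table.get(g, (0, 0))
--         table[g] = (s + x, c + 1)
--     # Groups with more than one element qualify; max raises ValueError when none do.
--     sums = [s for s, c in table.values() if c > 1]
--     return max(sums)
-- ===== Notes on version B (the rewrite author's own statement) =====
-- stated objective: alternative
-- what changed: A tracks the current run in one fused loop, flushing its sum into a result list at each break and at the last index; B instead labels every element with a group id in a first pass, accumulates per-id (sum, count) pairs in a dict in a second pass, and takes max over the sums of ids with count > 1.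
import Mathlib
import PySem

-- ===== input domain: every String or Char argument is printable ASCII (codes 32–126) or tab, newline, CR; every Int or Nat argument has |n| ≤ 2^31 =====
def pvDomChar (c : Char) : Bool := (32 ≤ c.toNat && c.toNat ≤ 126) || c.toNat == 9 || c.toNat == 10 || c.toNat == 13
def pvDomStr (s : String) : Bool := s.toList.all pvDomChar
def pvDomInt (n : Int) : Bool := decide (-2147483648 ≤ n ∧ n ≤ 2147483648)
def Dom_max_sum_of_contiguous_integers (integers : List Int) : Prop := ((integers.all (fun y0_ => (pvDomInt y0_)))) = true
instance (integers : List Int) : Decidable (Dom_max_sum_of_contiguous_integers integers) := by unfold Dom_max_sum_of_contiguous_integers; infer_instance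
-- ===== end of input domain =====

-- B replaces A's fused group-tracking/flush loop by a group-id labelling pass plus a dict of
-- per-group (sum, count) accumulators; objective: alternative decomposition (same cost).

-- ===== PORT A =====
def integers_are_contiguous (value : Int) (compare : Int) : Bool :=
  compare == value + 1 || compare == value - 1

def pvAStep (n : Int) (st : List Int × List Int) (p : Int × Int) : List Int × List Int :=
  let sums := st.1
  let cur := st.2
  if cur = [] then (sums, cur ++ [p.2])
  else if integers_are_contiguous ((PySem.List.pyGet? cur (-1)).getD 0) p.2 then
    -- current_group[-1]: cur ≠ [] in this branch, so the getD default is never used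
    let cur' := cur ++ [p.2]
    if p.1 = n - 1 ∧ 1 < cur'.length then (sums ++ [cur'.sum], cur')
    else (sums, cur')
  else
    ((if 1 < cur.length then sums ++ [cur.sum] else sums), [p.2])

def max_sum_of_contiguous_integers (integers : List Int) : Int :=
  let st := (PySem.List.enumerate integers).foldl (pvAStep (integers.length : Int)) ([], [])
  -- max(sums): Pre_ excludes exactly the inputs where sums is empty (Python ValueError)
  (PySem.List.max? st.1 (fun y => y)).getD 0

-- ===== PORT B =====
def pvBStepIds (st : List Int × Int × Option Int) (x : Int) : List Int × Int × Option Int :=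
  let gid := match st.2.2 with
    | some p => if (x - p).natAbs ≠ 1 then st.2.1 + 1 else st.2.1
    | none => st.2.1
  (st.1 ++ [gid], gid, some x)

def pvBStepTbl (t : PySem.Dict Int (Int × Int)) (gx : Int × Int) : PySem.Dict Int (Int × Int) :=
  let sc := t.getD gx.1 (0, 0)
  t.insert gx.1 (sc.1 + gx.2, sc.2 + 1)

def max_sum_of_contiguous_integers_alt (integers : List Int) : Int :=
  let ids := (integers.foldl pvBStepIds ([], 0, none)).1
  let table := (ids.zip integers).foldl pvBStepTbl PySem.Dict.empty
  let sums := table.values.filterMap (fun sc => if 1 < sc.2 then some sc.1 else none)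
  -- max(sums): Pre_ excludes exactly the inputs where sums is empty (Python ValueError)
  (PySem.List.max? sums (fun y => y)).getD 0

-- ===== PRECONDITION & SPEC =====
-- Pre_ excludes exactly the inputs with no adjacent pair differing by 1 (no run of length > 1):
-- there Python A (and B) raise ValueError from max([]).
def Pre_max_sum_of_contiguous_integers (integers : List Int) : Prop :=
  ((integers.zip integers.tail).any (fun p => (p.2 - p.1).natAbs == 1)) = true
instance (integers : List Int) : Decidable (Pre_max_sum_of_contiguous_integers integers) := by
  unfold Pre_max_sum_of_contiguous_integers; infer_instance

def pvWitness_max_sum_of_contiguous_integers : List Int := [1, 2, 7]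

def Spec_max_sum_of_contiguous_integers (integers : List Int) (out : Int) : Prop := out = max_sum_of_contiguous_integers_alt integers
instance (integers : List Int) (out : Int) : Decidable (Spec_max_sum_of_contiguous_integers integers out) := by unfold Spec_max_sum_of_contiguous_integers; infer_instance

-- ===== CLAIM (what is proved, stated in full; the proofs are below) =====
def Claim_equal_max_sum_of_contiguous_integers : Prop := ∀ (integers : List Int), Dom_max_sum_of_contiguous_integers integers → Pre_max_sum_of_contiguous_integers integers → Spec_max_sum_of_contiguous_integers integers (max_sum_of_contiguous_integers integers)

-- ===== LEMMAS AND PROOFS =====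

-- Canonical description of both programs: the list of (sum, count) of the maximal ±1-runs.
def pvGroups (last s c : Int) : List Int → List (Int × Int)
  | [] => [(s, c)]
  | x :: xs => if (x - last).natAbs = 1 then pvGroups x (s + x) (c + 1) xs
               else (s, c) :: pvGroups x x 1 xs

-- the same, with B's group ids attached
def pvGLab (g last s c : Int) : List Int → List (Int × (Int × Int))
  | [] => [(g, (s, c))]
  | x :: xs => if (x - last).natAbs = 1 then pvGLab g x (s + x) (c + 1) xs
               else (g, (s, c)) :: pvGLab (g + 1) x x 1 xs

-- B's first-pass labels
def pvLabels (gid prev : Int) : List Int → List Int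
  | [] => []
  | x :: xs =>
      let g := if (x - prev).natAbs ≠ 1 then gid + 1 else gid
      g :: pvLabels g x xs

def pvFlt (l : List (Int × Int)) : List Int :=
  l.filterMap (fun sc => if 1 < sc.2 then some sc.1 else none)

lemma pvCtg_iff (a b : Int) : integers_are_contiguous a b = true ↔ (b - a).natAbs = 1 := by
  simp [integers_are_contiguous]; omega

lemma pvGet_last (g : List Int) (last : Int) (h : g.getLast? = some last) :
    PySem.List.pyGet? g (-1) = some last := by
  have hne : g ≠ [] := by rintro rfl; simp at h
  have hlen : 0 < g.length := List.length_pos_iff.mpr hne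
  simp only [PySem.List.pyGet?, PySem.List.pyIdx?]
  rw [if_neg (by omega), if_pos (by omega)]
  simp only [Option.bind_some]
  rw [← h, List.getLast?_eq_getElem?]
  norm_num

lemma pvFlt_cons (s c : Int) (r : List (Int × Int)) :
    pvFlt ((s, c) :: r) = (if 1 < c then [s] else []) ++ pvFlt r := by
  by_cases h : 1 < c <;> simp [pvFlt, h]

lemma pvAStep_eq (n k x : Int) (sums g : List Int) (last : Int)
    (hg : g ≠ []) (hcur : PySem.List.pyGet? g (-1) = some last) :
    pvAStep n (sums, g) (k, x)
      = if (x - last).natAbs = 1 then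
          (if k = n - 1 then (sums ++ [g.sum + x], g ++ [x]) else (sums, g ++ [x]))
        else ((if 1 < g.length then sums ++ [g.sum] else sums), [x]) := by
  have hglen : 0 < g.length := List.length_pos_iff.mpr hg
  simp only [pvAStep, if_neg hg, hcur, Option.getD_some]
  by_cases hc : (x - last).natAbs = 1
  · rw [if_pos ((pvCtg_iff _ _).mpr hc), if_pos hc]
    by_cases hk : k = n - 1
    · rw [if_pos ⟨hk, by simp; omega⟩, if_pos hk]; simp
    · rw [if_neg (by simp [hk]), if_neg hk]
  · rw [if_neg (by simp [pvCtg_iff, hc]), if_neg hc]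

-- A's loop over a nonempty suffix, with a nonempty current group, appends exactly the
-- qualifying run sums of the suffix.
lemma pvLemA (n : Int) (ys : List Int) : ∀ (k : Int) (sums g : List Int) (last : Int),
    g ≠ [] → g.getLast? = some last → ys ≠ [] → k + (ys.length : Int) = n →
    ((PySem.List.enumerate ys k).foldl (pvAStep n) (sums, g)).1
      = sums ++ pvFlt (pvGroups last g.sum (g.length : Int) ys) := by
  induction ys with
  | nil => intro k sums g last _ _ hne _; exact absurd rfl hne
  | cons y t ih =>
    intro k sums g last hg hlast _ hk
    have hglen : 0 < g.length := List.length_pos_iff.mpr hg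
    have hcur : PySem.List.pyGet? g (-1) = some last := pvGet_last g last hlast
    rw [PySem.List.enumerate_cons, List.foldl_cons,
        pvAStep_eq n k y sums g last hg hcur]
    by_cases hc : (y - last).natAbs = 1
    · rw [if_pos hc]
      simp only [pvGroups, if_pos hc]
      cases t with
      | nil =>
        have hk1 : k = n - 1 := by simp at hk; omega
        rw [if_pos hk1]
        simp only [PySem.List.enumerate_nil, List.foldl_nil, pvGroups]
        rw [pvFlt_cons]
        have : (1 : Int) < (g.length : Int) + 1 := by omega
        simp [pvFlt, this]
      | cons z t' =>
        have hk1 : ¬ (k = n - 1) := by simp at hk; omega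
        rw [if_neg hk1]
        rw [ih (k + 1) sums (g ++ [y]) y (by simp) (by simp) (by simp)
            (by simp at hk ⊢; omega)]
        simp only [List.sum_append, List.sum_cons, List.sum_nil, List.length_append,
          List.length_cons, List.length_nil]
        push_cast
        ring_nf
    · rw [if_neg hc]
      have hsplit : pvFlt (pvGroups last g.sum (g.length : Int) (y :: t))
          = (if 1 < g.length then [g.sum] else []) ++ pvFlt (pvGroups y y 1 t) := by
        simp only [pvGroups, if_neg hc]
        rw [pvFlt_cons]
        congr 1
        split <;> split <;> first | rfl | omega
      cases t with
      | nil =>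
        simp only [PySem.List.enumerate_nil, List.foldl_nil, hsplit]
        have : pvFlt (pvGroups y y 1 []) = [] := by simp [pvGroups, pvFlt]
        rw [this]
        split <;> simp
      | cons z t' =>
        rw [ih (k + 1) _ [y] y (by simp) (by simp) (by simp) (by simp at hk ⊢; omega)]
        simp only [List.sum_cons, List.sum_nil, List.length_cons, List.length_nil, hsplit]
        split <;> simp

lemma pvA_eq (integers : List Int) :
    max_sum_of_contiguous_integers integers
      = (PySem.List.max? (match integers with
          | [] => []
          | x :: xs => pvFlt (pvGroups x x 1 xs)) (fun y => y)).getD 0 := by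
  cases integers with
  | nil => rfl
  | cons x xs =>
    cases xs with
    | nil =>
      simp [max_sum_of_contiguous_integers, PySem.List.enumerate_cons,
        PySem.List.enumerate_nil, pvAStep, pvGroups, pvFlt]
    | cons y t =>
      unfold max_sum_of_contiguous_integers
      rw [PySem.List.enumerate_cons, List.foldl_cons]
      have h1 : pvAStep (((x :: y :: t).length : Nat) : Int) ([], []) (0, x) = ([], [x]) := by
        simp [pvAStep]
      rw [h1, show (0 : Int) + 1 = 1 from rfl]
      show (PySem.List.max? (List.foldl (pvAStep (((x :: y :: t).length : Nat) : Int))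
          ([], [x]) (PySem.List.enumerate (y :: t) 1)).1 (fun y => y)).getD 0 = _
      rw [pvLemA (((x :: y :: t).length : Nat) : Int) (y :: t) 1 [] [x] x (by simp) (by simp)
          (by simp) (by push_cast [List.length_cons]; ring)]
      simp

lemma pvLemB1 (xs : List Int) : ∀ (ids : List Int) (gid prev : Int),
    (xs.foldl pvBStepIds (ids, gid, some prev)).1 = ids ++ pvLabels gid prev xs := by
  induction xs with
  | nil => intro ids gid prev; simp [pvLabels]
  | cons x t ih =>
    intro ids gid prev
    rw [List.foldl_cons]
    show (t.foldl pvBStepIds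
      (ids ++ [if (x - prev).natAbs ≠ 1 then gid + 1 else gid],
       (if (x - prev).natAbs ≠ 1 then gid + 1 else gid), some x)).1 = _
    rw [ih]
    simp [pvLabels]

lemma pvLemB2 (xs : List Int) : ∀ (g last s c : Int) (D : List (Int × (Int × Int))),
    (∀ p ∈ D, p.1 < g) → (D.map Prod.fst).Nodup →
    (((pvLabels g last xs).zip xs).foldl pvBStepTbl (PySem.Dict.mk (D ++ [(g, (s, c))]))).items
      = D ++ pvGLab g last s c xs := by
  induction xs with
  | nil => intro g last s c D _ _; simp [pvLabels, pvGLab]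
  | cons x t ih =>
    intro g last s c D hlt hnd
    have hgnotin : g ∉ D.map Prod.fst := by
      intro hmem
      obtain ⟨p, hp, hpe⟩ := List.mem_map.mp hmem
      exact absurd (hpe ▸ hlt p hp) (lt_irrefl g)
    have hkeys : (PySem.Dict.mk (D ++ [(g, (s, c))])).keys.Nodup := by
      simp only [PySem.Dict.keys, List.map_append, List.map_cons,
        List.map_nil, List.nodup_append]
      refine ⟨hnd, List.nodup_singleton _, ?_⟩
      intro a hmem b hb
      simp only [List.mem_singleton] at hb
      subst hb
      rintro rfl
      exact hgnotin hmem
    by_cases hc : (x - last).natAbs = 1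
    · have hlab : pvLabels g last (x :: t) = g :: pvLabels g x t := by
        simp [pvLabels, hc]
      rw [hlab, List.zip_cons_cons, List.foldl_cons]
      have hget : (PySem.Dict.mk (D ++ [(g, (s, c))])).getD g (0, 0) = (s, c) :=
        PySem.Dict.getD_of_mem_items _ (by simp) hkeys (0, 0)
      have hcont : (PySem.Dict.mk (D ++ [(g, (s, c))])).contains g := by
        rw [PySem.Dict.contains_iff_mem_keys]
        simp [PySem.Dict.keys]
      have hstep : pvBStepTbl (PySem.Dict.mk (D ++ [(g, (s, c))])) (g, x)
          = PySem.Dict.mk (D ++ [(g, (s + x, c + 1))]) := by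
        simp only [pvBStepTbl, hget]
        apply PySem.Dict.ext
        rw [PySem.Dict.items_insert_of_contains _ _ hcont]
        simp only [List.map_append, List.map_cons, List.map_nil, BEq.rfl, if_true]
        congr 1
        refine (List.map_congr_left ?_).trans (List.map_id D)
        intro p hp
        have hne : p.1 ≠ g := by
          intro he
          exact hgnotin (he ▸ List.mem_map_of_mem hp)
        simp [hne]
      rw [hstep, ih g x (s + x) (c + 1) D hlt hnd]
      simp [pvGLab, hc]
    · have hlab : pvLabels g last (x :: t) = (g + 1) :: pvLabels (g + 1) x t := by
        simp [pvLabels, hc]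
      rw [hlab, List.zip_cons_cons, List.foldl_cons]
      have hcont : (PySem.Dict.mk (D ++ [(g, (s, c))])).contains (g + 1) = false := by
        rw [PySem.Dict.contains_eq_decide_mem_keys]
        simp only [PySem.Dict.keys, List.map_append, List.map_cons,
          List.map_nil, decide_eq_false_iff_not, List.mem_append, List.mem_singleton]
        rintro (hmem | he)
        · obtain ⟨p, hp, hpe⟩ := List.mem_map.mp hmem
          have := hlt p hp; omega
        · omega
      have hget : (PySem.Dict.mk (D ++ [(g, (s, c))])).getD (g + 1) (0, 0) = (0, 0) :=
        PySem.Dict.getD_of_not_contains _ (0, 0) hcont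
      have hstep : pvBStepTbl (PySem.Dict.mk (D ++ [(g, (s, c))])) (g + 1, x)
          = PySem.Dict.mk ((D ++ [(g, (s, c))]) ++ [(g + 1, (x, 1))]) := by
        simp only [pvBStepTbl, hget]
        apply PySem.Dict.ext
        rw [PySem.Dict.items_insert_of_not_contains _ _ hcont]
        simp
      rw [hstep, ih (g + 1) x x 1 (D ++ [(g, (s, c))])
          (by intro p hp
              rcases List.mem_append.mp hp with h | h
              · have := hlt p h; omega
              · simp at h; subst h; simp)
          (by simp only [List.map_append, List.map_cons, List.map_nil, List.nodup_append]
              refine ⟨hnd, List.nodup_singleton _, ?_⟩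
              intro a hmem b hb
              simp only [List.mem_singleton] at hb
              subst hb
              rintro rfl
              exact hgnotin hmem)]
      simp [pvGLab, hc]

lemma pvGLab_snd (xs : List Int) : ∀ (g last s c : Int),
    (pvGLab g last s c xs).map Prod.snd = pvGroups last s c xs := by
  induction xs with
  | nil => intro g last s c; simp [pvGLab, pvGroups]
  | cons x t ih =>
    intro g last s c
    by_cases hc : (x - last).natAbs = 1 <;>
      simp [pvGLab, pvGroups, hc, ih]

lemma pvB_eq (integers : List Int) :
    max_sum_of_contiguous_integers_alt integers
      = (PySem.List.max? (match integers with
          | [] => []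
          | x :: xs => pvFlt (pvGroups x x 1 xs)) (fun y => y)).getD 0 := by
  cases integers with
  | nil => rfl
  | cons x xs =>
    unfold max_sum_of_contiguous_integers_alt
    show (PySem.List.max? (((((x :: xs).foldl pvBStepIds ([], 0, none)).1.zip (x :: xs)).foldl
        pvBStepTbl PySem.Dict.empty).values.filterMap
        (fun sc => if 1 < sc.2 then some sc.1 else none)) (fun y => y)).getD 0 = _
    rw [List.foldl_cons]
    show (PySem.List.max? ((((xs.foldl pvBStepIds ([0], 0, some x)).1.zip (x :: xs)).foldl
        pvBStepTbl PySem.Dict.empty).values.filterMap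
        (fun sc => if 1 < sc.2 then some sc.1 else none)) (fun y => y)).getD 0 = _
    rw [pvLemB1 xs [0] 0 x]
    have hz : ([0] ++ pvLabels 0 x xs).zip (x :: xs) = (0, x) :: (pvLabels 0 x xs).zip xs := rfl
    rw [hz, List.foldl_cons]
    have h0 : pvBStepTbl PySem.Dict.empty (0, x) = PySem.Dict.mk ([] ++ [(0, (x, 1))]) := by
      apply PySem.Dict.ext
      simp only [pvBStepTbl, PySem.Dict.getD_empty]
      rw [PySem.Dict.items_insert_of_not_contains _ _ (PySem.Dict.contains_empty 0)]
      simp [PySem.Dict.empty]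
    rw [h0]
    simp only [PySem.Dict.values]
    rw [pvLemB2 xs 0 x x 1 [] (by simp) (by simp), List.nil_append, pvGLab_snd]
    rfl

-- ===== VERDICT (by name: the statement is the Claim_ definition above) =====
theorem max_sum_of_contiguous_integers_spec : Claim_equal_max_sum_of_contiguous_integers := by
  intro integers _ _
  unfold Spec_max_sum_of_contiguous_integers
  rw [pvA_eq, pvB_eq]
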